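-- pv_equiv track=rewrite | github.com/dokoliho/aoc24 | day04_solution.py | diagonals_starting_top_right
-- ===== SOURCE A (Python) =====
-- def diagonals_starting_top_right(puzzle):
--     n = len(puzzle)
--     diamond = []
--     for d in range(2 * n - 1):
--         diagonal = []
--         if d < n:
--             row, col = d, n-1
--         else:
--             row, col = n - 1, 2 * n - 2 - d
--         while row >= 0 and col >= 0:
--             diagonal.append(puzzle[row][col])
--             row -= 1
--             col -= 1
--         diamond.append("".join(diagonal))
--     return diamond
-- ===== SOURCE B (Python) =====
-- def diagonals_starting_top_right(puzzle):
--     n = len(puzzle)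
--     buckets = {}
--     for row in range(n):
--         for col in range(n):
--             k = row - col
--             buckets[k] = [puzzle[row][col]] + buckets.get(k, [])
--     return ["".join(buckets.get(k, [])) for k in range(1 - n, n)]
-- ===== Notes on version B (the rewrite author's own statement) =====
-- stated objective: alternative
-- what changed: A walks each of the 2n-1 diagonals up-left from a computed start cell; B makes one grouping pass over the grid, bucketing characters by the key row-col in a dict, then emits the buckets in ascending key order.
import Mathlib
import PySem

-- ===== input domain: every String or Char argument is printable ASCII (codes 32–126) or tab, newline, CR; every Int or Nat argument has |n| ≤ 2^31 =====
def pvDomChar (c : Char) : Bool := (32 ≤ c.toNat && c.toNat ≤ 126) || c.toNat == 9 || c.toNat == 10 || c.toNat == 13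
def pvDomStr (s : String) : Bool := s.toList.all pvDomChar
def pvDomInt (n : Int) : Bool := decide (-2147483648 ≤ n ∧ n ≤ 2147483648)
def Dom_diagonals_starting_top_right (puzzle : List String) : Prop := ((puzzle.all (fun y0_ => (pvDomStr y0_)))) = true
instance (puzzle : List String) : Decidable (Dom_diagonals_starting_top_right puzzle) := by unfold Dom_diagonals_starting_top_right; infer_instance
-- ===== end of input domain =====

-- B replaces A's per-diagonal up-left walks by a single grouping pass over the grid keyed by row-col (objective: alternative).

-- ===== PORT A =====
-- puzzle[row][col]: two Python indexings; in range on every input Pre_ admits, so the defaults are never read there.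
def pvCell (puzzle : List String) (row col : Int) : Char :=
  (PySem.Str.pyGet? ((PySem.List.pyGet? puzzle row).getD "") col).getD ' '

def pvWalk (puzzle : List String) (row col : Int) : List Char :=
  if 0 ≤ row ∧ 0 ≤ col then
    pvCell puzzle row col :: pvWalk puzzle (row - 1) (col - 1)
  else []
termination_by (row + 1).toNat
decreasing_by omega

def diagonals_starting_top_right (puzzle : List String) : List String :=
  let n : Int := puzzle.length
  (PySem.List.pyRange 0 (2 * n - 1) 1).foldl
    (fun diamond d =>
      let rc : Int × Int := if d < n then (d, n - 1) else (n - 1, 2 * n - 2 - d)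
      diamond ++ [String.ofList (pvWalk puzzle rc.1 rc.2)])
    []

-- ===== PORT B =====
def diagonals_starting_top_right_alt (puzzle : List String) : List String :=
  let n : Int := puzzle.length
  let buckets : PySem.Dict Int (List Char) :=
    (PySem.List.pyRange 0 n 1).foldl
      (fun b row =>
        (PySem.List.pyRange 0 n 1).foldl
          (fun b col => b.modify (row - col) [] (fun l => pvCell puzzle row col :: l))
          b)
      PySem.Dict.empty
  (PySem.List.pyRange (1 - n) n 1).map (fun k => String.ofList (buckets.getD k []))

-- ===== PRECONDITION & SPEC =====
-- A indexes puzzle[row][col] for every 0 ≤ row, col < len(puzzle); it raises IndexError exactly when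
-- some row string is shorter than the number of rows, so Pre_ excludes exactly those inputs.
def Pre_diagonals_starting_top_right (puzzle : List String) : Prop :=
  ∀ s ∈ puzzle, puzzle.length ≤ s.toList.length
instance (puzzle : List String) : Decidable (Pre_diagonals_starting_top_right puzzle) := by
  unfold Pre_diagonals_starting_top_right; infer_instance

def pvWitness_diagonals_starting_top_right : List String := ["ab", "cd"]

def Spec_diagonals_starting_top_right (puzzle : List String) (out : List String) : Prop := out = diagonals_starting_top_right_alt puzzle
instance (puzzle : List String) (out : List String) : Decidable (Spec_diagonals_starting_top_right puzzle out) := by unfold Spec_diagonals_starting_top_right; infer_instance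

-- ===== CLAIM (what is proved, stated in full; the proofs are below) =====
def Claim_equal_diagonals_starting_top_right : Prop := ∀ (puzzle : List String), Dom_diagonals_starting_top_right puzzle → Pre_diagonals_starting_top_right puzzle → Spec_diagonals_starting_top_right puzzle (diagonals_starting_top_right puzzle)

-- ===== LEMMAS AND PROOFS =====

theorem pvWalk_eq_map (puzzle : List String) (row col : Int) :
    pvWalk puzzle row col
      = (List.range (min row col + 1).toNat).map (fun i : Nat => pvCell puzzle (row - (i : Int)) (col - (i : Int))) := by
  by_cases h : 0 ≤ row ∧ 0 ≤ col
  · rw [pvWalk, if_pos h]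
    have hm : (min row col + 1).toNat = (min (row - 1) (col - 1) + 1).toNat + 1 := by omega
    rw [hm, List.range_succ_eq_map, List.map_cons, List.map_map,
        pvWalk_eq_map puzzle (row - 1) (col - 1)]
    simp only [Nat.cast_zero, sub_zero]
    congr 1
    apply List.map_congr_left
    intro i _
    simp only [Function.comp_apply]
    congr 1 <;> push_cast <;> ring
  · rw [pvWalk, if_neg h]
    have : (min row col + 1).toNat = 0 := by omega
    rw [this]; rfl
termination_by (row + 1).toNat
decreasing_by omega

theorem getD_foldl_modify_prepend (l : List (Int × Char)) (d : PySem.Dict Int (List Char)) (c : Int) :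
    (l.foldl (fun d p => d.modify p.1 [] (fun b => p.2 :: b)) d).getD c []
      = ((l.filter (fun p => p.1 == c)).map (·.2)).reverse ++ d.getD c [] := by
  induction l generalizing d with
  | nil => simp
  | cons p t ih =>
      simp only [List.foldl_cons, ih, List.filter_cons]
      by_cases hc : p.1 = c
      · simp [hc]
      · have hb : (p.1 == c) = false := by simp [hc]
        simp [hb, PySem.Dict.getD_modify, Ne.symm hc]

theorem foldl_foldl_eq_foldl_pairs {α β : Type} (rows cols : List α)
    (g : β → α × α → β) (init : β) :
    rows.foldl (fun b r => cols.foldl (fun b c => g b (r, c)) b) init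
      = (rows.flatMap (fun r => cols.map (fun c => (r, c)))).foldl g init := by
  induction rows generalizing init with
  | nil => rfl
  | cons r t ih => simp [List.foldl_append, ih, List.foldl_map]

theorem filter_range_eq_int (m : Nat) (v : Int) :
    (List.range m).filter (fun c : Nat => decide ((c : Int) = v))
      = if 0 ≤ v ∧ v < (m : Int) then [v.toNat] else [] := by
  induction m with
  | zero => simp only [List.range_zero, List.filter_nil, Nat.cast_zero]
            rw [if_neg (by omega)]
  | succ m ih =>
      rw [List.range_succ, List.filter_append, ih]
      by_cases h : (m : Int) = v
      · have h1 : ¬ (0 ≤ v ∧ v < (m : Int)) := by omega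
        have h2 : 0 ≤ v ∧ v < ((m + 1 : Nat) : Int) := by omega
        rw [if_neg h1, if_pos h2]
        simp [h]; omega
      · by_cases h2 : 0 ≤ v ∧ v < (m : Int)
        · have h3 : 0 ≤ v ∧ v < ((m + 1 : Nat) : Int) := by omega
          rw [if_pos h2, if_pos h3]; simp [h]
        · have h3 : ¬ (0 ≤ v ∧ v < ((m + 1 : Nat) : Int)) := by omega
          rw [if_neg h2, if_neg h3]; simp [h]

theorem flatMap_ite_singleton {α β : Type} (l : List α) (p : α → Prop) [DecidablePred p] (f : α → β) :
    (l.flatMap (fun x => if p x then [f x] else []))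
      = (l.filter (fun x => decide (p x))).map f := by
  induction l with
  | nil => rfl
  | cons x t ih => by_cases h : p x <;> simp [h, ih]

theorem filter_range_interval (m a b : Nat) :
    (List.range m).filter (fun r => decide (a ≤ r ∧ r < b))
      = (List.range (min b m - a)).map (a + ·) := by
  induction m with
  | zero => simp
  | succ m ih =>
      rw [List.range_succ, List.filter_append, ih]
      by_cases h : a ≤ m ∧ m < b
      · have h1 : min b (m + 1) - a = (min b m - a) + 1 := by omega
        have h2 : a + (min b m - a) = m := by omega
        rw [h1, List.range_succ, List.map_append]
        simp [h, h2]
      · have h1 : min b (m + 1) - a = min b m - a := by omega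
        rw [h1]; simp [h]

-- the bucket of key k after B's grouping pass
theorem bucket_getD (puzzle : List String) (nn : Nat) (k : Int) :
    (((List.range nn).map (fun r : Nat => (r : Int))).foldl
        (fun b row =>
          (((List.range nn).map (fun c : Nat => (c : Int))).foldl
            (fun b col => b.modify (row - col) [] (fun l => pvCell puzzle row col :: l))
            b))
        (PySem.Dict.empty : PySem.Dict Int (List Char))).getD k []
      = (((List.range nn).filter (fun r : Nat => decide (k ≤ (r : Int) ∧ (r : Int) < k + nn))).map
          (fun r : Nat => pvCell puzzle r ((r : Int) - k))).reverse := by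
  rw [List.foldl_map]
  have inner : ∀ (b : PySem.Dict Int (List Char)) (r : Nat),
      ((List.range nn).map (fun c : Nat => (c : Int))).foldl
        (fun b col => b.modify ((r : Int) - col) [] (fun l => pvCell puzzle r col :: l)) b
      = (List.range nn).foldl
        (fun b c => b.modify ((r : Int) - (c : Int)) [] (fun l => pvCell puzzle r c :: l)) b := by
    intro b r; rw [List.foldl_map]
  simp only [inner]
  simp only [foldl_foldl_eq_foldl_pairs (rows := List.range nn) (cols := List.range nn)
      (g := fun (b : PySem.Dict Int (List Char)) (p : Nat × Nat) =>
        b.modify ((p.1 : Int) - (p.2 : Int)) [] (fun l => pvCell puzzle p.1 p.2 :: l))]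
  rw [← List.foldl_map (f := fun p : Nat × Nat => (((p.1 : Int) - (p.2 : Int)), pvCell puzzle p.1 p.2))
        (g := fun (d : PySem.Dict Int (List Char)) (p : Int × Char) => d.modify p.1 [] (fun b => p.2 :: b))]
  rw [getD_foldl_modify_prepend]
  simp only [PySem.Dict.getD_empty, List.append_nil]
  congr 1
  rw [List.map_flatMap, List.filter_flatMap, List.map_flatMap]
  have per_row : ∀ r : Nat,
      List.map (fun p : Int × Char => p.2)
        (List.filter (fun p : Int × Char => p.1 == k)
          (List.map (fun p : Nat × Nat => (((p.1 : Int) - (p.2 : Int)), pvCell puzzle p.1 p.2))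
            (List.map (fun c : Nat => (r, c)) (List.range nn))))
      = if k ≤ (r : Int) ∧ (r : Int) < k + nn then [pvCell puzzle r ((r : Int) - k)] else [] := by
    intro r
    rw [List.map_map, List.filter_map, List.map_map]
    have hcong : (List.filter ((fun p : Int × Char => p.1 == k) ∘
          ((fun p : Nat × Nat => (((p.1 : Int) - (p.2 : Int)), pvCell puzzle p.1 p.2)) ∘ (fun c : Nat => (r, c))))
          (List.range nn))
        = (List.range nn).filter (fun c : Nat => decide ((c : Int) = (r : Int) - k)) := by
      apply List.filter_congr
      intro c _
      simp only [Function.comp_apply, beq_eq_decide, decide_eq_decide]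
      omega
    rw [hcong, filter_range_eq_int]
    by_cases h : k ≤ (r : Int) ∧ (r : Int) < k + nn
    · rw [if_pos (by omega), if_pos h]
      simp only [List.map_cons, List.map_nil, Function.comp_apply]
      have : (((r : Int) - k).toNat : Int) = (r : Int) - k := by omega
      rw [this]
    · rw [if_neg (by omega), if_neg h]
      simp
  simp only [per_row]
  simp only [flatMap_ite_singleton (l := List.range nn)
    (p := fun r : Nat => k ≤ (r : Int) ∧ (r : Int) < k + nn)
    (f := fun r : Nat => pvCell puzzle r ((r : Int) - k))]

theorem main_eq (puzzle : List String) :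
    diagonals_starting_top_right puzzle = diagonals_starting_top_right_alt puzzle := by
  unfold diagonals_starting_top_right diagonals_starting_top_right_alt
  simp only [PySem.List.foldl_append_singleton_eq_map, List.nil_append]
  rw [PySem.List.pyRange_zero (2 * (puzzle.length : Int) - 1),
      PySem.List.pyRange_zero (puzzle.length : Int),
      PySem.List.pyRange_one (1 - (puzzle.length : Int)) (puzzle.length : Int)]
  have hM : ((puzzle.length : Int) - (1 - (puzzle.length : Int))).toNat
      = (2 * (puzzle.length : Int) - 1).toNat := by omega
  rw [hM]
  have hnn : ((puzzle.length : Int)).toNat = puzzle.length := by omega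
  rw [hnn]
  rw [List.map_map, List.map_map]
  apply List.map_congr_left
  intro j hj
  rw [List.mem_range] at hj
  simp only [Function.comp_apply]
  rw [bucket_getD]
  congr 1
  have hfilt : (List.range puzzle.length).filter
        (fun r : Nat => decide (1 - (puzzle.length : Int) + j ≤ (r : Int) ∧
          (r : Int) < 1 - (puzzle.length : Int) + j + puzzle.length))
      = (List.range puzzle.length).filter
        (fun r : Nat => decide ((1 - (puzzle.length : Int) + j).toNat ≤ r ∧
          r < min puzzle.length (1 - (puzzle.length : Int) + j + puzzle.length).toNat)) := by
    apply List.filter_congr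
    intro r hr
    rw [List.mem_range] at hr
    simp only [decide_eq_decide]
    omega
  rw [hfilt, filter_range_interval, List.map_map, ← List.map_reverse,
      List.range_eq_range', List.reverse_range', List.map_map]
  by_cases hd : (j : Int) < (puzzle.length : Int)
  · simp only [if_pos hd]
    rw [pvWalk_eq_map]
    have hlen : (min (j : Int) ((puzzle.length : Int) - 1) + 1).toNat
        = min (min puzzle.length (1 - (puzzle.length : Int) + j + puzzle.length).toNat)
            puzzle.length - (1 - (puzzle.length : Int) + j).toNat := by omega
    rw [hlen]
    apply List.map_congr_left
    intro i hi
    rw [List.mem_range] at hi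
    simp only [Function.comp_apply]
    congr 1 <;> omega
  · simp only [if_neg hd]
    rw [pvWalk_eq_map]
    have hlen : (min ((puzzle.length : Int) - 1) (2 * (puzzle.length : Int) - 2 - j) + 1).toNat
        = min (min puzzle.length (1 - (puzzle.length : Int) + j + puzzle.length).toNat)
            puzzle.length - (1 - (puzzle.length : Int) + j).toNat := by omega
    rw [hlen]
    apply List.map_congr_left
    intro i hi
    rw [List.mem_range] at hi
    simp only [Function.comp_apply]
    congr 1 <;> omega

-- ===== VERDICT (by name: the statement is the Claim_ definition above) =====
theorem diagonals_starting_top_right_spec : Claim_equal_diagonals_starting_top_right := by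
  intro puzzle _ _
  exact main_eq puzzle
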